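-- pv_equiv track=rewrite | github.com/sine-io/cosbench-go | scripts/smoke_ready.py | smoke_matrix_result
-- ===== SOURCE A (Python) =====
-- def smoke_output_result(latest, output):
--     if not latest:
--         return "none"
--     if latest.get("status") != "completed":
--         return "pending"
--     if not output:
--         return "failed"
--     if "--- SKIP:" in output and "PASS" in output and "t.Fatalf" not in output:
--         return "skipped"
--     if "PASS" in output and "--- SKIP:" not in output:
--         return "executed"
--     return "failed"
--
-- def smoke_matrix_result(latest, detail):
--     if not latest:
--         return "none"
--     if latest.get("status") != "completed":
--         return "pending"
--     if not detail:
--         return "failed"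
--     row_results = []
--     for row in detail.get("rows", []):
--         output = row.get("output", "")
--         row_status = row.get("status", "")
--         if row_status in {"executed", "skipped", "failed"}:
--             row_results.append(row_status)
--             continue
--         if row_status != "present":
--             row_results.append("failed")
--             continue
--         row_results.append(smoke_output_result({"status": "completed"}, output))
--     if not row_results:
--         return "failed"
--     unique = set(row_results)
--     if unique == {"executed"}:
--         return "executed"
--     if unique == {"skipped"}:
--         return "skipped"
--     if unique == {"failed"}:
--         return "failed"
--     if "pending" in unique:
--         return "pending"
--     return "partial"
-- ===== SOURCE B (Python) =====
-- def smoke_matrix_result(latest, detail):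
--     if not latest:
--         return "none"
--     if latest.get("status") != "completed":
--         return "pending"
--     if not detail:
--         return "failed"
--     verdict = None
--     for row in detail.get("rows", []):
--         status = row.get("status", "")
--         if status in ("executed", "skipped", "failed"):
--             cat = status
--         elif status != "present":
--             cat = "failed"
--         else:
--             output = row.get("output", "")
--             if not output:
--                 cat = "failed"
--             elif "--- SKIP:" in output and "PASS" in output and "t.Fatalf" not in output:
--                 cat = "skipped"
--             elif "PASS" in output and "--- SKIP:" not in output:
--                 cat = "executed"
--             else:
--                 cat = "failed"
--         if verdict is None:
--             verdict = cat
--         elif verdict != cat: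
--             verdict = "partial"
--     return verdict if verdict is not None else "failed"
-- ===== Notes on version B (the rewrite author's own statement) =====
-- stated objective: simpler
-- what changed: B classifies each row inline and folds the rows in one pass into a single running verdict (collapsing to 'partial' on the first mismatch), instead of building a row_results list, converting it to a set and comparing the set against singletons.
import Mathlib
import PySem

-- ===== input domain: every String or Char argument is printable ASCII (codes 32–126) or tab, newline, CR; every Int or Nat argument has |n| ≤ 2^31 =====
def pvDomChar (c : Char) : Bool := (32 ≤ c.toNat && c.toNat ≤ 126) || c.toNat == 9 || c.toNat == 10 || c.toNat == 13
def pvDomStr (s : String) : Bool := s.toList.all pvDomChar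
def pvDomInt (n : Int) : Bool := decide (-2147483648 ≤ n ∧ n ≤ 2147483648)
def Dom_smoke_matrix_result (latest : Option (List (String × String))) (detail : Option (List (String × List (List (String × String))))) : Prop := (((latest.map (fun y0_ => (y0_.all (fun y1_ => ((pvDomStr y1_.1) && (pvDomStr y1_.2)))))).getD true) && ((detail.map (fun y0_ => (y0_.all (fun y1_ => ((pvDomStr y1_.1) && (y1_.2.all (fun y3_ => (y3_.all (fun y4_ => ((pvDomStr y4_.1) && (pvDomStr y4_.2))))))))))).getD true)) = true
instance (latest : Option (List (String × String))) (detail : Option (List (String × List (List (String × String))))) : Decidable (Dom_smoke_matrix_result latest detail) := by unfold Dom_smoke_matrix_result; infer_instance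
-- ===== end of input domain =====

-- B replaces A's row_results list + set-of-results classification by a single fold that
-- keeps one running verdict, collapsing to "partial" on the first differing row category (objective: simpler).

-- ===== PORT A =====
-- smoke_output_result, transliterated
def smoke_output_result (latest : List (String × String)) (output : String) : String :=
  if latest.isEmpty then "none"
  else if (PySem.Dict.mk latest).get? "status" ≠ some "completed" then "pending"
  else if output = "" then "failed"
  else if PySem.Str.isIn "--- SKIP:" output && PySem.Str.isIn "PASS" output
          && !PySem.Str.isIn "t.Fatalf" output then "skipped"
  else if PySem.Str.isIn "PASS" output && !PySem.Str.isIn "--- SKIP:" output then "executed"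
  else "failed"

def smoke_matrix_result (latest : Option (List (String × String))) (detail : Option (List (String × List (List (String × String))))) : String :=
  match latest with
  | none => "none"
  | some l =>
    if l.isEmpty then "none"
    else if (PySem.Dict.mk l).get? "status" ≠ some "completed" then "pending"
    else match detail with
      | none => "failed"
      | some d =>
        if d.isEmpty then "failed"
        else
          let rows := (PySem.Dict.mk d).getD "rows" []
          let row_results := rows.foldl (fun acc row =>
            let output := (PySem.Dict.mk row).getD "output" ""
            let row_status := (PySem.Dict.mk row).getD "status" ""
            if row_status = "executed" ∨ row_status = "skipped" ∨ row_status = "failed" then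
              acc ++ [row_status]
            else if row_status ≠ "present" then acc ++ ["failed"]
            else acc ++ [smoke_output_result [("status", "completed")] output]) []
          if row_results.isEmpty then "failed"
          else
            let unique : PySem.Set String := PySem.Set.ofList row_results
            if PySem.Set.equal unique (PySem.Set.ofList ["executed"]) then "executed"
            else if PySem.Set.equal unique (PySem.Set.ofList ["skipped"]) then "skipped"
            else if PySem.Set.equal unique (PySem.Set.ofList ["failed"]) then "failed"
            else if PySem.Set.contains unique "pending" then "pending"
            else "partial"

-- ===== PORT B =====
-- per-row category, inlined output classification (Source B's cat)
def pvRowCat (row : List (String × String)) : String :=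
  let status := (PySem.Dict.mk row).getD "status" ""
  if status = "executed" ∨ status = "skipped" ∨ status = "failed" then status
  else if status ≠ "present" then "failed"
  else
    let output := (PySem.Dict.mk row).getD "output" ""
    if output = "" then "failed"
    else if PySem.Str.isIn "--- SKIP:" output && PySem.Str.isIn "PASS" output
            && !PySem.Str.isIn "t.Fatalf" output then "skipped"
    else if PySem.Str.isIn "PASS" output && !PySem.Str.isIn "--- SKIP:" output then "executed"
    else "failed"

def smoke_matrix_result_alt (latest : Option (List (String × String))) (detail : Option (List (String × List (List (String × String))))) : String :=
  match latest with
  | none => "none"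
  | some l =>
    if l.isEmpty then "none"
    else if (PySem.Dict.mk l).get? "status" ≠ some "completed" then "pending"
    else match detail with
      | none => "failed"
      | some d =>
        if d.isEmpty then "failed"
        else
          let verdict := ((PySem.Dict.mk d).getD "rows" []).foldl (fun v row =>
            let c := pvRowCat row
            match v with
            | none => some c
            | some w => if w = c then some w else some "partial") none
          verdict.getD "failed"

-- ===== PRECONDITION & SPEC =====
def Spec_smoke_matrix_result (latest : Option (List (String × String))) (detail : Option (List (String × List (List (String × String))))) (out : String) : Prop := out = smoke_matrix_result_alt latest detail
instance (latest : Option (List (String × String))) (detail : Option (List (String × List (List (String × String))))) (out : String) : Decidable (Spec_smoke_matrix_result latest detail out) := by unfold Spec_smoke_matrix_result; infer_instance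

-- ===== CLAIM (what is proved, stated in full; the proofs are below) =====
def Claim_equal_smoke_matrix_result : Prop := ∀ (latest : Option (List (String × String))) (detail : Option (List (String × List (List (String × String))))), Dom_smoke_matrix_result latest detail → Spec_smoke_matrix_result latest detail (smoke_matrix_result latest detail)

-- ===== LEMMAS AND PROOFS =====

-- A's per-row loop step appends exactly B's row category
theorem step_eq (acc : List String) (row : List (String × String)) :
    (let output := (PySem.Dict.mk row).getD "output" ""
     let row_status := (PySem.Dict.mk row).getD "status" ""
     if row_status = "executed" ∨ row_status = "skipped" ∨ row_status = "failed" then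
       acc ++ [row_status]
     else if row_status ≠ "present" then acc ++ ["failed"]
     else acc ++ [smoke_output_result [("status", "completed")] output])
    = acc ++ [pvRowCat row] := by
  simp only []
  unfold pvRowCat
  by_cases h1 : (PySem.Dict.mk row).getD "status" "" = "executed" ∨ (PySem.Dict.mk row).getD "status" "" = "skipped" ∨ (PySem.Dict.mk row).getD "status" "" = "failed"
  · simp only [if_pos h1]
  · rw [if_neg h1, if_neg h1]
    by_cases h2 : (PySem.Dict.mk row).getD "status" "" ≠ "present"
    · simp only [if_pos h2]
    · rw [if_neg h2, if_neg h2]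
      congr 1

-- foldl-append builds the map of pvRowCat
theorem rowresults_eq_map (rows : List (List (String × String))) (acc : List String) :
    rows.foldl (fun acc row =>
      let output := (PySem.Dict.mk row).getD "output" ""
      let row_status := (PySem.Dict.mk row).getD "status" ""
      if row_status = "executed" ∨ row_status = "skipped" ∨ row_status = "failed" then
        acc ++ [row_status]
      else if row_status ≠ "present" then acc ++ ["failed"]
      else acc ++ [smoke_output_result [("status", "completed")] output]) acc
    = acc ++ rows.map pvRowCat := by
  induction rows generalizing acc with
  | nil => simp
  | cons r rs ih =>
    simp only [List.foldl_cons, List.map_cons]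
    rw [ih, step_eq acc r]
    simp

-- every row category is one of the three terminal states
theorem rowCat_cases (row : List (String × String)) :
    pvRowCat row = "executed" ∨ pvRowCat row = "skipped" ∨ pvRowCat row = "failed" := by
  dsimp only [pvRowCat]
  split_ifs <;> simp_all

-- B's fold over the rows is the abstract fold over the row categories
theorem fold_rows (rows : List (List (String × String))) (v : Option String) :
    rows.foldl (fun v row =>
      let c := pvRowCat row
      match v with
      | none => some c
      | some w => if w = c then some w else some "partial") v
    = (rows.map pvRowCat).foldl (fun v c =>
        match v with
        | none => some c
        | some w => if w = c then some w else some "partial") v := by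
  induction rows generalizing v with
  | nil => rfl
  | cons r rs ih =>
    simp only [List.foldl_cons, List.map_cons]
    exact ih _

-- B's fold starting from a seeded verdict
theorem fold_some (cs : List String) (w : String) :
    cs.foldl (fun v c =>
      match v with
      | none => some c
      | some w => if w = c then some w else some "partial") (some w)
    = some (if cs.all (fun c => c = w) then w else "partial") := by
  induction cs generalizing w with
  | nil => simp
  | cons c cs ih =>
    simp only [List.foldl_cons, List.all_cons]
    by_cases h : w = c
    · subst h
      rw [if_pos rfl, ih]
      simp
    · rw [if_neg h, ih]
      have : ¬ (c = w) := fun hh => h hh.symm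
      simp [this]

-- set(cs) equals {x} iff every element of the nonempty cs is x
theorem set_equal_singleton_iff (c : String) (cs : List String) (x : String) :
    PySem.Set.equal (PySem.Set.ofList (c :: cs)) (PySem.Set.ofList [x]) = true
      ↔ (c = x ∧ ∀ y ∈ cs, y = x) := by
  rw [PySem.Set.equal_iff]
  constructor
  · intro h
    have hc : c ∈ PySem.Set.ofList [x] := (h c).1 (by simp [PySem.Set.mem_ofList])
    have hc' : c = x := by simpa [PySem.Set.mem_ofList] using hc
    refine ⟨hc', fun y hy => ?_⟩
    have : y ∈ PySem.Set.ofList [x] := (h y).1 (by simp [PySem.Set.mem_ofList, hy])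
    simpa [PySem.Set.mem_ofList] using this
  · rintro ⟨rfl, hall⟩ y
    simp only [PySem.Set.mem_ofList, List.mem_cons, List.not_mem_nil, or_false]
    constructor
    · rintro (rfl | hy)
      · rfl
      · exact hall y hy
    · rintro rfl
      exact Or.inl rfl

-- A's set classification of a nonempty category list = the collapsed verdict
theorem classify_eq (c : String) (cs : List String)
    (h : ∀ y ∈ c :: cs, y = "executed" ∨ y = "skipped" ∨ y = "failed") :
    (if PySem.Set.equal (PySem.Set.ofList (c :: cs)) (PySem.Set.ofList ["executed"]) then "executed"
     else if PySem.Set.equal (PySem.Set.ofList (c :: cs)) (PySem.Set.ofList ["skipped"]) then "skipped"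
     else if PySem.Set.equal (PySem.Set.ofList (c :: cs)) (PySem.Set.ofList ["failed"]) then "failed"
     else if PySem.Set.contains (PySem.Set.ofList (c :: cs)) "pending" then "pending"
     else "partial")
    = (if cs.all (fun y => y = c) then c else "partial") := by
  have heq := fun x => set_equal_singleton_iff c cs x
  by_cases hall : ∀ y ∈ cs, y = c
  · rw [if_pos (show cs.all (fun y => y = c) = true by
      simp only [List.all_eq_true, decide_eq_true_eq]; exact hall)]
    rcases h c (List.mem_cons_self) with hc | hc | hc <;> subst hc
    · rw [if_pos ((heq "executed").2 ⟨rfl, hall⟩)]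
    · have h1 : ¬ (PySem.Set.equal (PySem.Set.ofList ("skipped" :: cs)) (PySem.Set.ofList ["executed"]) = true) := by
        intro hx; have := ((heq "executed").1 hx).1; simp at this
      rw [if_neg h1, if_pos ((heq "skipped").2 ⟨rfl, hall⟩)]
    · have h1 : ¬ (PySem.Set.equal (PySem.Set.ofList ("failed" :: cs)) (PySem.Set.ofList ["executed"]) = true) := by
        intro hx; have := ((heq "executed").1 hx).1; simp at this
      have h2 : ¬ (PySem.Set.equal (PySem.Set.ofList ("failed" :: cs)) (PySem.Set.ofList ["skipped"]) = true) := by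
        intro hx; have := ((heq "skipped").1 hx).1; simp at this
      rw [if_neg h1, if_neg h2, if_pos ((heq "failed").2 ⟨rfl, hall⟩)]
  · obtain ⟨y, hy, hyc⟩ : ∃ y ∈ cs, y ≠ c := by
      by_contra hno
      exact hall fun y hy => by
        by_contra hne
        exact hno ⟨y, hy, hne⟩
    rw [if_neg (show ¬ (cs.all (fun y => y = c) = true) by
      simp only [List.all_eq_true]; intro hh; exact hyc (of_decide_eq_true (hh y hy)))]
    have hne : ∀ x, ¬ (PySem.Set.equal (PySem.Set.ofList (c :: cs)) (PySem.Set.ofList [x]) = true) := by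
      intro x hx
      obtain ⟨h1, h2⟩ := (heq x).1 hx
      exact hyc (by rw [h2 y hy, h1])
    have hpend : ¬ (PySem.Set.contains (PySem.Set.ofList (c :: cs)) "pending" = true) := by
      intro hx
      have : ("pending" : String) ∈ PySem.Set.ofList (c :: cs) := (PySem.Set.contains_iff _ _).1 hx
      have hm : ("pending" : String) ∈ c :: cs := by simpa [PySem.Set.mem_ofList] using this
      rcases h _ hm with hh | hh | hh <;> simp at hh
    rw [if_neg (hne "executed"), if_neg (hne "skipped"), if_neg (hne "failed"), if_neg hpend]

-- the rows-processing tails of the two ports agree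
theorem tail_eq (rows : List (List (String × String))) :
    (if (rows.foldl (fun acc row =>
          let output := (PySem.Dict.mk row).getD "output" ""
          let row_status := (PySem.Dict.mk row).getD "status" ""
          if row_status = "executed" ∨ row_status = "skipped" ∨ row_status = "failed" then
            acc ++ [row_status]
          else if row_status ≠ "present" then acc ++ ["failed"]
          else acc ++ [smoke_output_result [("status", "completed")] output]) ([] : List String)).isEmpty
     then "failed"
     else
       if PySem.Set.equal (PySem.Set.ofList (rows.foldl (fun acc row =>
          let output := (PySem.Dict.mk row).getD "output" ""
          let row_status := (PySem.Dict.mk row).getD "status" ""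
          if row_status = "executed" ∨ row_status = "skipped" ∨ row_status = "failed" then
            acc ++ [row_status]
          else if row_status ≠ "present" then acc ++ ["failed"]
          else acc ++ [smoke_output_result [("status", "completed")] output]) ([] : List String))) (PySem.Set.ofList ["executed"]) then "executed"
       else if PySem.Set.equal (PySem.Set.ofList (rows.foldl (fun acc row =>
          let output := (PySem.Dict.mk row).getD "output" ""
          let row_status := (PySem.Dict.mk row).getD "status" ""
          if row_status = "executed" ∨ row_status = "skipped" ∨ row_status = "failed" then
            acc ++ [row_status]
          else if row_status ≠ "present" then acc ++ ["failed"]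
          else acc ++ [smoke_output_result [("status", "completed")] output]) ([] : List String))) (PySem.Set.ofList ["skipped"]) then "skipped"
       else if PySem.Set.equal (PySem.Set.ofList (rows.foldl (fun acc row =>
          let output := (PySem.Dict.mk row).getD "output" ""
          let row_status := (PySem.Dict.mk row).getD "status" ""
          if row_status = "executed" ∨ row_status = "skipped" ∨ row_status = "failed" then
            acc ++ [row_status]
          else if row_status ≠ "present" then acc ++ ["failed"]
          else acc ++ [smoke_output_result [("status", "completed")] output]) ([] : List String))) (PySem.Set.ofList ["failed"]) then "failed"
       else if PySem.Set.contains (PySem.Set.ofList (rows.foldl (fun acc row =>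
          let output := (PySem.Dict.mk row).getD "output" ""
          let row_status := (PySem.Dict.mk row).getD "status" ""
          if row_status = "executed" ∨ row_status = "skipped" ∨ row_status = "failed" then
            acc ++ [row_status]
          else if row_status ≠ "present" then acc ++ ["failed"]
          else acc ++ [smoke_output_result [("status", "completed")] output]) ([] : List String))) "pending" then "pending"
       else "partial")
    = (rows.foldl (fun v row =>
        let c := pvRowCat row
        match v with
        | none => some c
        | some w => if w = c then some w else some "partial") none).getD "failed" := by
  rw [rowresults_eq_map rows [], fold_rows rows none]
  simp only [List.nil_append]
  obtain ⟨l, hl⟩ : ∃ l, rows.map pvRowCat = l := ⟨_, rfl⟩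
  have h3 : ∀ y ∈ l, y = "executed" ∨ y = "skipped" ∨ y = "failed" := by
    rw [← hl]
    intro y hy
    obtain ⟨r, _, rfl⟩ := List.mem_map.1 hy
    exact rowCat_cases r
  rw [hl]
  cases l with
  | nil => rfl
  | cons c cs =>
    rw [show ((c :: cs).isEmpty) = false from rfl]
    simp only [Bool.false_eq_true, if_false]
    simp only [List.foldl_cons]
    rw [fold_some cs c]
    rw [show (some (if cs.all (fun c' => c' = c) then c else "partial")).getD "failed"
        = (if cs.all (fun c' => c' = c) then c else "partial") from rfl]
    exact classify_eq c cs h3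

-- ===== VERDICT (by name: the statement is the Claim_ definition above) =====
theorem smoke_matrix_result_spec : Claim_equal_smoke_matrix_result := by
  intro latest detail _
  show smoke_matrix_result latest detail = smoke_matrix_result_alt latest detail
  unfold smoke_matrix_result smoke_matrix_result_alt
  cases latest with
  | none => rfl
  | some l =>
    refine if_congr Iff.rfl rfl (if_congr Iff.rfl rfl ?_)
    cases detail with
    | none => rfl
    | some d =>
      refine if_congr Iff.rfl rfl ?_
      exact tail_eq _
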